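-- pv_equiv track=rewrite | github.com/alejandro-garf/CIS247C | Notes/Lecture5.py | break_tie
-- ===== SOURCE A (Python) =====
-- def draw_card(player_deck):
--     if player_deck:
--         return player_deck.pop(0)  # Changed: Now removes the first card instead of a random card
--     return None
--
-- def compare_cards(player_card, computer_card):
--     card_values = {str(i): i for i in range(2, 11)}  # Added: Dictionary to map card values
--     card_values.update({'J': 11, 'Q': 12, 'K': 13, 'A': 14})  # Added: Face card values
--
--     if card_values[player_card] > card_values[computer_card]:
--         return 'Player'
--     elif card_values[player_card] < card_values[computer_card]:
--         return 'Computer'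
--     else:
--         return 'Tie'
--
-- def break_tie(player_deck, computer_deck, tie_cards):  # Added: New function to handle tie-breaks
--     if len(player_deck) < 4 or len(computer_deck) < 4:
--         # If either player doesn't have enough cards, game over
--         return 'Game Over', tie_cards
--
--     # Draw 3 face-down cards from each deck
--     player_down = [draw_card(player_deck) for _ in range(3)]
--     computer_down = [draw_card(computer_deck) for _ in range(3)]
--
--     # Draw the 4th card face-up
--     player_up = draw_card(player_deck)
--     computer_up = draw_card(computer_deck)
--
--     tie_cards.extend(player_down + computer_down + [player_up, computer_up])
--
--     result = compare_cards(player_up, computer_up)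
--
--     if result == 'Player':
--         return 'Player', tie_cards
--     elif result == 'Computer':
--         return 'Computer', tie_cards
--     else:
--         # Another tie, recursively call break_tie
--         return break_tie(player_deck, computer_deck, tie_cards)
-- ===== SOURCE B (Python) =====
-- CARD_VALUES = {**{str(i): i for i in range(2, 11)}, 'J': 11, 'Q': 12, 'K': 13, 'A': 14}
--
-- def break_tie(player_deck, computer_deck, tie_cards):
--     # iterative: scan both decks with a cursor k, 4 cards per round; trims the decks
--     # at the end to leave the same final deck states A's pops leave
--     k = 0
--     while len(player_deck) - k >= 4 and len(computer_deck) - k >= 4: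
--         tie_cards.extend(player_deck[k:k + 3] + computer_deck[k:k + 3]
--                          + [player_deck[k + 3], computer_deck[k + 3]])
--         pv = CARD_VALUES[player_deck[k + 3]]
--         cv = CARD_VALUES[computer_deck[k + 3]]
--         k += 4
--         if pv != cv:
--             del player_deck[:k]
--             del computer_deck[:k]
--             return ('Player' if pv > cv else 'Computer'), tie_cards
--     del player_deck[:k]
--     del computer_deck[:k]
--     return 'Game Over', tie_cards
-- ===== Notes on version B (the rewrite author's own statement) =====
-- stated objective: alternative
-- what changed: Replaces A's recursion with per-round deck popping and a per-call dict rebuild by a single iterative cursor loop over the unchanged decks with a module-level card table, trimming the decks once at the end.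
import Mathlib
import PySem

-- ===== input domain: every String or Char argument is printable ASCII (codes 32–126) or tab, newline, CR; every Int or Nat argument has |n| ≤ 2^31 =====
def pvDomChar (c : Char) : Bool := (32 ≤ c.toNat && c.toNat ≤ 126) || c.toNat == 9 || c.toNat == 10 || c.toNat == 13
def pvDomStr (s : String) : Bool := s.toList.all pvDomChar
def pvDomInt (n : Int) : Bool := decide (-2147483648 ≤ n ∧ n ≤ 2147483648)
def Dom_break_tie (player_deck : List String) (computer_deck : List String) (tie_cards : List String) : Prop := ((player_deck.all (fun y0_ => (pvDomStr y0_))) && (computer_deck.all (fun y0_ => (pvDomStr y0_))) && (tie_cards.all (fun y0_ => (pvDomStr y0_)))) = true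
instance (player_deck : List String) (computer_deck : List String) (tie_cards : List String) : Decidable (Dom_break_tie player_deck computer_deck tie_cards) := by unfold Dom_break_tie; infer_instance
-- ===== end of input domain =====

-- B replaces A's recursive deck-popping tie-break by a single cursor-indexed loop over the
-- unchanged decks (objective: alternative decomposition). Both A and B mutate the deck and
-- tie_cards arguments in place; B leaves the same final states where it returns, and the
-- equivalence proved here is about the RETURN value.

-- ===== PORT A =====
-- deck.pop(0): returns (popped card or none, remaining deck)
def draw_card (player_deck : List String) : Option String × List String :=
  match player_deck with
  | [] => (none, [])
  | x :: rest => (some x, rest)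

-- card_values = {str(i): i for i in range(2, 11)}; card_values.update({'J':11,'Q':12,'K':13,'A':14})
def card_values : PySem.Dict String Int :=
  let d := (PySem.List.pyRange 2 11 1).foldl (fun d i => d.insert (PySem.Int.toStr i) i) PySem.Dict.empty
  (((d.insert "J" 11).insert "Q" 12).insert "K" 13).insert "A" 14

-- Python raises KeyError on a card outside the table; those inputs are excluded by Pre_break_tie
-- (the "KeyError" branch is unreachable there).
def compare_cards (player_card : String) (computer_card : String) : String :=
  match card_values.get? player_card, card_values.get? computer_card with
  | some a, some b => if a > b then "Player" else if a < b then "Computer" else "Tie"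
  | _, _ => "KeyError"

-- used by decreasing_by of the port
theorem draw_card_len (d : List String) : (draw_card d).2.length = d.length - 1 := by
  cases d <;> simp [draw_card]

def break_tie (player_deck : List String) (computer_deck : List String) (tie_cards : List String) : String × List String :=
  if player_deck.length < 4 ∨ computer_deck.length < 4 then ("Game Over", tie_cards)
  else
    let r1 := draw_card player_deck
    let r2 := draw_card r1.2
    let r3 := draw_card r2.2
    let player_down := [r1.1, r2.1, r3.1]
    let s1 := draw_card computer_deck
    let s2 := draw_card s1.2
    let s3 := draw_card s2.2
    let computer_down := [s1.1, s2.1, s3.1]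
    let r4 := draw_card r3.2
    let player_up := r4.1
    let s4 := draw_card s3.2
    let computer_up := s4.1
    let tie_cards2 := tie_cards ++ (player_down ++ computer_down ++ [player_up, computer_up]).map (fun o => o.getD "")
    let result := compare_cards (player_up.getD "") (computer_up.getD "")
    if result = "Player" then ("Player", tie_cards2)
    else if result = "Computer" then ("Computer", tie_cards2)
    else break_tie r4.2 s4.2 tie_cards2
termination_by player_deck.length
decreasing_by simp [draw_card_len]; omega

-- ===== PORT B =====
-- module-level CARD_VALUES of Source B (same dict literal as A's local one)
def card_values_b : PySem.Dict String Int :=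
  let d := (PySem.List.pyRange 2 11 1).foldl (fun d i => d.insert (PySem.Int.toStr i) i) PySem.Dict.empty
  (((d.insert "J" 11).insert "Q" 12).insert "K" 13).insert "A" 14

-- the while-loop of Source B, cursor k; the "KeyError" branch is where Source B raises (outside Pre_)
def bt_loop (player_deck : List String) (computer_deck : List String) (tie_cards : List String) (k : Nat) : String × List String :=
  if 4 ≤ player_deck.length - k ∧ 4 ≤ computer_deck.length - k then
    let tie_cards2 := tie_cards ++
      (PySem.List.slice player_deck (some (k : Int)) (some ((k : Int) + 3)) ++
       PySem.List.slice computer_deck (some (k : Int)) (some ((k : Int) + 3)) ++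
       [(PySem.List.pyGet? player_deck ((k : Int) + 3)).getD "",
        (PySem.List.pyGet? computer_deck ((k : Int) + 3)).getD ""])
    match card_values_b.get? ((PySem.List.pyGet? player_deck ((k : Int) + 3)).getD ""),
          card_values_b.get? ((PySem.List.pyGet? computer_deck ((k : Int) + 3)).getD "") with
    | some pv, some cv =>
      if pv ≠ cv then ((if pv > cv then "Player" else "Computer"), tie_cards2)
      else bt_loop player_deck computer_deck tie_cards2 (k + 4)
    | _, _ => ("KeyError", tie_cards2)
  else ("Game Over", tie_cards)
termination_by player_deck.length - k

def break_tie_alt (player_deck : List String) (computer_deck : List String) (tie_cards : List String) : String × List String :=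
  bt_loop player_deck computer_deck tie_cards 0

-- ===== PRECONDITION & SPEC =====
-- the value the card table assigns to a card, none for a card outside the table
def cardVal? (s : String) : Option Int :=
  match s with
  | "2" => some 2 | "3" => some 3 | "4" => some 4 | "5" => some 5 | "6" => some 6
  | "7" => some 7 | "8" => some 8 | "9" => some 9 | "10" => some 10
  | "J" => some 11 | "Q" => some 12 | "K" => some 13 | "A" => some 14
  | _ => none

-- round j ended in a tie: both face-up cards (positions 4j+3) are in the table with equal values
def tieAt (player_deck : List String) (computer_deck : List String) (j : Nat) : Prop :=
  (cardVal? (player_deck.getD (4 * j + 3) "")).isSome = true ∧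
  cardVal? (player_deck.getD (4 * j + 3) "") = cardVal? (computer_deck.getD (4 * j + 3) "")

-- Pre_ excludes exactly the inputs on which A raises KeyError: a round the game actually
-- reaches (all earlier rounds tied, enough cards in both decks) whose face-up card in either
-- deck is outside the 13-card table; on every other input A returns normally.
def Pre_break_tie (player_deck : List String) (computer_deck : List String) (tie_cards : List String) : Prop :=
  ∀ m : Nat, m < min player_deck.length computer_deck.length / 4 →
    (∀ j : Nat, j < m → tieAt player_deck computer_deck j) →
    (cardVal? (player_deck.getD (4 * m + 3) "")).isSome = true ∧
    (cardVal? (computer_deck.getD (4 * m + 3) "")).isSome = true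

instance (player_deck : List String) (computer_deck : List String) (tie_cards : List String) : Decidable (Pre_break_tie player_deck computer_deck tie_cards) := by
  unfold Pre_break_tie tieAt; infer_instance

def pvWitness_break_tie : List String × List String × List String :=
  (["2", "3", "4", "K"], ["5", "6", "7", "Q"], ["A"])

def Spec_break_tie (player_deck : List String) (computer_deck : List String) (tie_cards : List String) (out : String × List String) : Prop := out = break_tie_alt player_deck computer_deck tie_cards
instance (player_deck : List String) (computer_deck : List String) (tie_cards : List String) (out : String × List String) : Decidable (Spec_break_tie player_deck computer_deck tie_cards out) := by unfold Spec_break_tie; infer_instance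

-- ===== CLAIM (what is proved, stated in full; the proofs are below) =====
def Claim_equal_break_tie : Prop := ∀ (player_deck : List String) (computer_deck : List String) (tie_cards : List String), Dom_break_tie player_deck computer_deck tie_cards → Pre_break_tie player_deck computer_deck tie_cards → Spec_break_tie player_deck computer_deck tie_cards (break_tie player_deck computer_deck tie_cards)

-- ===== LEMMAS AND PROOFS =====

theorem card_values_eq : card_values_b = card_values := by decide

theorem get?_eq_cardVal? (s : String) (v : Int) (h : cardVal? s = some v) :
    card_values.get? s = some v := by
  unfold cardVal? at h
  split at h <;> first | (injection h with h; subst_vars; decide) | simp at h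

theorem loop_eq (n : Nat) (player_deck computer_deck tie_cards : List String) (q : Nat)
    (hn : player_deck.length - 4 * q ≤ n)
    (hpre : ∀ m : Nat, m < min player_deck.length computer_deck.length / 4 →
      (∀ j : Nat, j < m → tieAt player_deck computer_deck j) →
      (cardVal? (player_deck.getD (4 * m + 3) "")).isSome = true ∧
      (cardVal? (computer_deck.getD (4 * m + 3) "")).isSome = true)
    (htie : ∀ j : Nat, j < q → tieAt player_deck computer_deck j) :
    bt_loop player_deck computer_deck tie_cards (4 * q) =
      break_tie (player_deck.drop (4 * q)) (computer_deck.drop (4 * q)) tie_cards := by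
  induction n generalizing tie_cards q with
  | zero =>
    rw [bt_loop, break_tie]
    have h1 : ¬ (4 ≤ player_deck.length - 4 * q ∧ 4 ≤ computer_deck.length - 4 * q) := by omega
    rw [if_neg h1, if_pos (by simp; omega)]
  | succ n ih =>
    by_cases hg : 4 ≤ player_deck.length - 4 * q ∧ 4 ≤ computer_deck.length - 4 * q
    · have hkp : 4 * q + 4 ≤ player_deck.length := by omega
      have hkc : 4 * q + 4 ≤ computer_deck.length := by omega
      have hv := hpre q (by omega) htie
      have hgp : ((4 * q : Nat) : Int) + 3 = ((4 * q + 3 : Nat) : Int) := by push_cast; ring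
      have hdp : player_deck.drop (4 * q) = player_deck[4 * q] :: player_deck[4 * q + 1] ::
          player_deck[4 * q + 2] :: player_deck[4 * q + 3] :: player_deck.drop (4 * q + 4) := by
        rw [List.drop_eq_getElem_cons (by omega), List.drop_eq_getElem_cons (by omega),
            List.drop_eq_getElem_cons (by omega), List.drop_eq_getElem_cons (by omega)]
        rfl
      have hdc : computer_deck.drop (4 * q) = computer_deck[4 * q] :: computer_deck[4 * q + 1] ::
          computer_deck[4 * q + 2] :: computer_deck[4 * q + 3] :: computer_deck.drop (4 * q + 4) := by
        rw [List.drop_eq_getElem_cons (by omega), List.drop_eq_getElem_cons (by omega),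
            List.drop_eq_getElem_cons (by omega), List.drop_eq_getElem_cons (by omega)]
        rfl
      rw [bt_loop, if_pos hg, break_tie, if_neg (by simp; omega)]
      have hsp : PySem.List.slice player_deck (some ((4 * q : Nat) : Int)) (some (((4 * q : Nat) : Int) + 3))
          = [player_deck[4 * q], player_deck[4 * q + 1], player_deck[4 * q + 2]] := by
        rw [hgp, PySem.List.slice_natCast, show 4 * q + 3 - 4 * q = 3 from by omega, hdp]
        rfl
      have hsc : PySem.List.slice computer_deck (some ((4 * q : Nat) : Int)) (some (((4 * q : Nat) : Int) + 3))
          = [computer_deck[4 * q], computer_deck[4 * q + 1], computer_deck[4 * q + 2]] := by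
        rw [hgp, PySem.List.slice_natCast, show 4 * q + 3 - 4 * q = 3 from by omega, hdc]
        rfl
      have hup : PySem.List.pyGet? player_deck (((4 * q : Nat) : Int) + 3) = some player_deck[4 * q + 3] := by
        rw [hgp, PySem.List.pyGet?_natCast]
        exact List.getElem?_eq_getElem (by omega)
      have huc : PySem.List.pyGet? computer_deck (((4 * q : Nat) : Int) + 3) = some computer_deck[4 * q + 3] := by
        rw [hgp, PySem.List.pyGet?_natCast]
        exact List.getElem?_eq_getElem (by omega)
      rw [hsp, hsc, hup, huc, hdp, hdc]
      have e1 : player_deck.getD (4 * q + 3) "" = player_deck[4 * q + 3] :=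
        List.getD_eq_getElem _ _ (by omega)
      have e2 : computer_deck.getD (4 * q + 3) "" = computer_deck[4 * q + 3] :=
        List.getD_eq_getElem _ _ (by omega)
      obtain ⟨pv, hpv⟩ := Option.isSome_iff_exists.mp hv.1
      obtain ⟨cv, hcv⟩ := Option.isSome_iff_exists.mp hv.2
      rw [e1] at hpv; rw [e2] at hcv
      have hq1 : card_values.get? player_deck[4 * q + 3] = some pv := get?_eq_cardVal? _ _ hpv
      have hq2 : card_values.get? computer_deck[4 * q + 3] = some cv := get?_eq_cardVal? _ _ hcv
      simp only [draw_card, compare_cards, card_values_eq, hq1, hq2, Option.getD_some]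
      rcases lt_trichotomy pv cv with h | h | h
      · simp [h, asymm h, ne_of_lt h]
      · simp only [h, lt_irrefl, ite_false, ne_eq, not_true_eq_false]
        have htie' : ∀ j : Nat, j < q + 1 → tieAt player_deck computer_deck j := by
          intro j hj
          rcases Nat.lt_succ_iff_lt_or_eq.mp hj with hj' | rfl
          · exact htie j hj'
          · exact ⟨by rw [e1, hpv]; rfl, by rw [e1, e2, hpv, hcv, h]⟩
        have := ih (tie_cards ++
            ([player_deck[4 * q], player_deck[4 * q + 1], player_deck[4 * q + 2]] ++
             [computer_deck[4 * q], computer_deck[4 * q + 1], computer_deck[4 * q + 2]] ++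
             [player_deck[4 * q + 3], computer_deck[4 * q + 3]])) (q + 1) (by omega) htie'
        rw [show 4 * (q + 1) = 4 * q + 4 from by ring] at this
        simpa using this
      · simp [h, (ne_of_lt h).symm]
    · rw [bt_loop, break_tie, if_neg hg, if_pos (by simp; omega)]

-- ===== VERDICT (by name: the statement is the Claim_ definition above) =====
theorem break_tie_spec : Claim_equal_break_tie := by
  intro pd cd tc _ hpre
  unfold Spec_break_tie break_tie_alt
  have := loop_eq pd.length pd cd tc 0 (by omega) hpre (by omega)
  simpa using this.symm
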